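-- pv_equiv track=rewrite | github.com/cwlowder/blog-post-code | constraint-satisfaction/queens.py | eightQueensConstraint
-- ===== SOURCE A (Python) =====
-- def eightQueensConstraint(var, value, assignment):
-- 	count = 0
-- 	for y in range(8):
-- 		for x in range(8):
-- 			if (y,x) not in assignment:
-- 				# Only run if all points are assigned
-- 				return True
-- 			if assignment[(y,x)] == 'Q':
-- 				count += 1
-- 	# Final board must have 8 queens
-- 	return count == 8
-- ===== SOURCE B (Python) =====
-- def eightQueensConstraint(var, value, assignment):
-- 	# Single pass over the assignment's own entries instead of scanning the
-- 	# 64 board cells with a lookup each: count how many board cells are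
-- 	# covered and how many of them hold a queen.
-- 	covered = 0
-- 	queens = 0
-- 	for (y, x), v in assignment.items():
-- 		if 0 <= y < 8 and 0 <= x < 8:
-- 			covered += 1
-- 			if v == 'Q':
-- 				queens += 1
-- 	if covered < 64:
-- 		return True
-- 	return queens == 8
-- ===== Notes on version B (the rewrite author's own statement) =====
-- stated objective: alternative
-- what changed: Instead of iterating the 64 board cells with a dict lookup and early return per cell, B makes one pass over the assignment's entries, counting covered board cells and queens, and decides completeness from the covered count.
import Mathlib
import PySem

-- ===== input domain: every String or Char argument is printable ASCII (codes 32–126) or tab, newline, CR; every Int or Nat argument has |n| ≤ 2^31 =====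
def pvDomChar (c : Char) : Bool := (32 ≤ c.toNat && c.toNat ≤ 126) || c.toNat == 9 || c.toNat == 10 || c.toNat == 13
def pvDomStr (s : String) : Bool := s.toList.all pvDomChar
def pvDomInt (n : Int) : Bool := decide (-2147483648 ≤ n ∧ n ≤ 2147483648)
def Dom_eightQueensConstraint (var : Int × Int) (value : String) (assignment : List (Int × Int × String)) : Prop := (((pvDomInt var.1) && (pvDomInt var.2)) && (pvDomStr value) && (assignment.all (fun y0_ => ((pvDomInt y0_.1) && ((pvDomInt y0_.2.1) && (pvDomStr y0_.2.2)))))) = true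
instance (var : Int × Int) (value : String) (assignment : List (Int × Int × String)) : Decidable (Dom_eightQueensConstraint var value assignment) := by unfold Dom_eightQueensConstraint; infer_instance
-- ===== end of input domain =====

-- B replaces A's scan of the 64 board cells (dict lookup per cell, early return on a
-- missing cell) by one pass over the assignment's own entries, counting covered board
-- cells and queens; objective: alternative algorithm, same exact result.

-- ===== PORT A =====
-- dict key of an entry (the assoc list holds ((y, x), value) flattened to a triple)
def pvKey (p : Int × Int × String) : Int × Int := (p.1, p.2.1)

-- dict lookup `assignment[(y,x)]`: first matching entry of the association list
def pvLookup (assignment : List (Int × Int × String)) (c : Int × Int) : Option String :=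
  match assignment with
  | [] => none
  | p :: rest => if pvKey p = c then some p.2.2 else pvLookup rest c

-- the 64 board cells in A's iteration order (for y in range(8): for x in range(8))
def pvCells : List (Int × Int) :=
  (PySem.List.pyRange 0 8 1).flatMap (fun y => (PySem.List.pyRange 0 8 1).map (fun x => (y, x)))

-- A's loop: early return True on a missing cell, otherwise accumulate the queen count
def pvGoA (assignment : List (Int × Int × String)) : List (Int × Int) → Int → Bool
  | [], count => count == 8
  | c :: rest, count =>
    match pvLookup assignment c with
    | none => true
    | some v => pvGoA assignment rest (if v = "Q" then count + 1 else count)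

def eightQueensConstraint (_var : Int × Int) (_value : String) (assignment : List (Int × Int × String)) : Bool :=
  pvGoA assignment pvCells 0

-- ===== PORT B =====
-- `assignment.items()`: under the association-list convention (lookup = first match)
-- the dict's entries are the first occurrence of each key, in order
def pvItems : List (Int × Int × String) → List (Int × Int) → List (Int × Int × String)
  | [], _ => []
  | p :: rest, seen =>
    if pvKey p ∈ seen then pvItems rest seen else p :: pvItems rest (pvKey p :: seen)

-- `0 <= y < 8 and 0 <= x < 8`
def pvOnBoard (c : Int × Int) : Bool :=
  decide (0 ≤ c.1) && decide (c.1 < 8) && decide (0 ≤ c.2) && decide (c.2 < 8)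

-- B's loop over the entries, then the two final tests
def pvGoB : List (Int × Int × String) → Int → Int → Bool
  | [], covered, queens => if covered < 64 then true else queens == 8
  | p :: rest, covered, queens =>
    if pvOnBoard (pvKey p) then
      pvGoB rest (covered + 1) (if p.2.2 == "Q" then queens + 1 else queens)
    else
      pvGoB rest covered queens

def eightQueensConstraint_alt (_var : Int × Int) (_value : String) (assignment : List (Int × Int × String)) : Bool :=
  pvGoB (pvItems assignment []) 0 0

-- ===== PRECONDITION & SPEC =====
def Spec_eightQueensConstraint (var : Int × Int) (value : String) (assignment : List (Int × Int × String)) (out : Bool) : Prop := out = eightQueensConstraint_alt var value assignment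
instance (var : Int × Int) (value : String) (assignment : List (Int × Int × String)) (out : Bool) : Decidable (Spec_eightQueensConstraint var value assignment out) := by unfold Spec_eightQueensConstraint; infer_instance

-- ===== CLAIM (what is proved, stated in full; the proofs are below) =====
def Claim_equal_eightQueensConstraint : Prop := ∀ (var : Int × Int) (value : String) (assignment : List (Int × Int × String)), Dom_eightQueensConstraint var value assignment → Spec_eightQueensConstraint var value assignment (eightQueensConstraint var value assignment)

-- ===== LEMMAS AND PROOFS =====

-- A's fused loop in two-pass form, for any cell list and accumulator
theorem pvGoA_closed (assignment : List (Int × Int × String)) (cells : List (Int × Int)) (count : Int) :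
    pvGoA assignment cells count =
      (if cells.any (fun c => (pvLookup assignment c).isNone) then true
       else ((count + (cells.countP (fun c => pvLookup assignment c == some "Q") : Int)) == 8)) := by
  induction cells generalizing count with
  | nil => simp [pvGoA]
  | cons c rest ih =>
    cases h : pvLookup assignment c with
    | none => simp [pvGoA, h, List.any_cons]
    | some v =>
      simp only [pvGoA, h, List.any_cons, List.countP_cons, Option.isNone_some]
      by_cases hv : v = "Q" <;>
        simp [hv, ih, Int.add_comm, Int.add_assoc]

-- B's loop in closed form
theorem pvGoB_closed (items : List (Int × Int × String)) (covered queens : Int) :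
    pvGoB items covered queens =
      (if covered + (items.countP (fun p => pvOnBoard (pvKey p)) : Int) < 64 then true
       else ((queens + (items.countP (fun p => pvOnBoard (pvKey p) && p.2.2 == "Q") : Int)) == 8)) := by
  induction items generalizing covered queens with
  | nil => simp [pvGoB]
  | cons p rest ih =>
    simp only [pvGoB, List.countP_cons]
    by_cases hb : pvOnBoard (pvKey p) = true
    · by_cases hq : (p.2.2 == "Q") = true <;>
        simp [hb, hq, ih, Int.add_comm, Int.add_assoc]
    · simp [hb, ih]

-- every entry produced by pvItems has a key outside `seen`
theorem pvItems_key_not_mem_seen (xs : List (Int × Int × String)) (seen : List (Int × Int))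
    (p : Int × Int × String) (hp : p ∈ pvItems xs seen) : pvKey p ∉ seen := by
  induction xs generalizing seen with
  | nil => simp [pvItems] at hp
  | cons q rest ih =>
    simp only [pvItems] at hp
    split at hp
    · exact ih seen hp
    · rcases List.mem_cons.mp hp with h | h
      · subst h; assumption
      · intro hmem
        exact (ih _ h) (List.mem_cons_of_mem _ hmem)

-- the keys of pvItems are pairwise distinct
theorem pvItems_keys_nodup (xs : List (Int × Int × String)) (seen : List (Int × Int)) :
    ((pvItems xs seen).map pvKey).Nodup := by
  induction xs generalizing seen with
  | nil => simp [pvItems]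
  | cons q rest ih =>
    simp only [pvItems]
    split
    · exact ih seen
    · simp only [List.map_cons, List.nodup_cons]
      refine ⟨?_, ih _⟩
      intro hmem
      rcases List.mem_map.mp hmem with ⟨p, hp, hkey⟩
      exact pvItems_key_not_mem_seen rest _ p hp (by simp [hkey])

-- membership in the items list characterises the first-match lookup
theorem mem_pvItems_iff (xs : List (Int × Int × String)) (seen : List (Int × Int))
    (p : Int × Int × String) (hseen : pvKey p ∉ seen) :
    p ∈ pvItems xs seen ↔ pvLookup xs (pvKey p) = some p.2.2 := by
  induction xs generalizing seen with
  | nil => simp [pvItems, pvLookup]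
  | cons q rest ih =>
    simp only [pvItems, pvLookup]
    by_cases hk : pvKey q = pvKey p
    · have hqs : pvKey q ∈ seen ↔ False := by simp [hk, hseen]
      by_cases hmem : pvKey q ∈ seen
      · exact absurd hmem (hqs.mp · )
      · simp only [if_neg hmem, if_pos hk, List.mem_cons]
        constructor
        · rintro (rfl | h)
          · rfl
          · exact absurd (pvItems_key_not_mem_seen _ _ _ h) (by simp [hk])
        · intro h
          left
          have h2 : q.2.2 = p.2.2 := by injection h
          obtain ⟨q1, q2, q3⟩ := q
          obtain ⟨p1, p2, p3⟩ := p
          simp [pvKey] at hk h2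
          simp [hk.1, hk.2, h2]
    · by_cases hmem : pvKey q ∈ seen
      · simp only [if_pos hmem, if_neg hk]
        exact ih seen hseen
      · simp only [if_neg hmem, if_neg hk, List.mem_cons]
        rw [ih (pvKey q :: seen) (by
          intro hmem'
          rcases List.mem_cons.mp hmem' with h | h
          · exact hk h.symm
          · exact hseen h)]
        constructor
        · rintro (rfl | h)
          · exact absurd rfl hk
          · exact h
        · exact Or.inr
  
-- pvItems is nodup as a list of entries
theorem pvItems_nodup (xs : List (Int × Int × String)) (seen : List (Int × Int)) :
    (pvItems xs seen).Nodup :=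
  (pvItems_keys_nodup xs seen).of_map pvKey

-- the 64 cells, and their characterisation
theorem pvCells_nodup : pvCells.Nodup := by decide

theorem mem_pvCells_iff (c : Int × Int) : c ∈ pvCells ↔ pvOnBoard c = true := by
  obtain ⟨y, x⟩ := c
  simp only [pvCells, List.mem_flatMap, List.mem_map, pvOnBoard]
  constructor
  · rintro ⟨a, ha, b, hb, h⟩
    obtain ⟨h1, h2⟩ := Prod.mk.inj h
    subst h1; subst h2
    have ha' := PySem.List.mem_pyRange_one.mp ha
    have hb' := PySem.List.mem_pyRange_one.mp hb
    simp; omega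
  · intro h
    simp only [Bool.and_eq_true, decide_eq_true_eq] at h
    exact ⟨y, PySem.List.mem_pyRange_one.mpr ⟨h.1.1.1, h.1.1.2⟩,
           x, PySem.List.mem_pyRange_one.mpr ⟨h.1.2, h.2⟩, rfl⟩

-- the on-board entries of the dict are, up to permutation, the successful lookups over the cells
theorem pvItems_filter_perm (assignment : List (Int × Int × String)) :
    ((pvItems assignment []).filter (fun p => pvOnBoard (pvKey p))).Perm
      (pvCells.filterMap (fun c => (pvLookup assignment c).map (fun v => (c.1, c.2, v)))) := by
  have hkey : ∀ p : Int × Int × String, ∀ c v,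
      p = (c.1, c.2, v) → pvKey p = c ∧ p.2.2 = v := by
    rintro p ⟨c1, c2⟩ v rfl; exact ⟨rfl, rfl⟩
  apply (List.perm_ext_iff_of_nodup ((pvItems_nodup _ _).filter _) ?_).mpr
  · intro p
    simp only [List.mem_filter, List.mem_filterMap, Option.map_eq_some_iff]
    constructor
    · rintro ⟨hmem, hb⟩
      refine ⟨pvKey p, (mem_pvCells_iff _).mpr hb, p.2.2,
        (mem_pvItems_iff assignment [] p (by simp)).mp hmem, ?_⟩
      obtain ⟨p1, p2, p3⟩ := p; rfl
    · rintro ⟨c, hc, v, hlook, ⟨rfl⟩⟩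
      have hk : pvKey (c.1, c.2, v) = c := by obtain ⟨c1, c2⟩ := c; rfl
      refine ⟨(mem_pvItems_iff assignment [] _ (by simp)).mpr (by rw [hk]; exact hlook),
              by rw [hk]; exact (mem_pvCells_iff c).mp hc⟩
  · -- nodup of the filterMap: its keys are a filter of the nodup pvCells
    have hmap : (pvCells.filterMap
        (fun c => (pvLookup assignment c).map (fun v => (c.1, c.2, v)))).map pvKey =
        pvCells.filter (fun c => (pvLookup assignment c).isSome) := by
      induction pvCells with
      | nil => rfl
      | cons c rest ih =>
        cases h : pvLookup assignment c with
        | none => simp [h, ih]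
        | some v =>
          obtain ⟨c1, c2⟩ := c
          simp [h, ih, pvKey]
    exact ((hmap ▸ pvCells_nodup.filter _ : _)).of_map pvKey

-- counting through the permutation: entry-side counts equal cell-side counts
theorem count_items_eq_count_cells (assignment : List (Int × Int × String)) (P : String → Bool) :
    (pvItems assignment []).countP (fun p => pvOnBoard (pvKey p) && P p.2.2) =
      pvCells.countP (fun c => ((pvLookup assignment c).map P).getD false) := by
  have h1 : (pvItems assignment []).countP (fun p => pvOnBoard (pvKey p) && P p.2.2) =
      ((pvItems assignment []).filter (fun p => pvOnBoard (pvKey p))).countP (fun p => P p.2.2) := by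
    rw [List.countP_filter]
    apply List.countP_congr
    intro p _
    simp [Bool.and_comm]
  rw [h1, (pvItems_filter_perm assignment).countP_eq]
  induction pvCells with
  | nil => rfl
  | cons c rest ih =>
    cases h : pvLookup assignment c with
    | none => simp [h, ih]
    | some v => simp [List.countP_cons, h, ih]

-- ===== VERDICT (by name: the statement is the Claim_ definition above) =====
theorem eightQueensConstraint_spec : Claim_equal_eightQueensConstraint := by
  intro var value assignment _
  unfold Spec_eightQueensConstraint eightQueensConstraint eightQueensConstraint_alt
  rw [pvGoA_closed, pvGoB_closed]
  have hcov : (pvItems assignment []).countP (fun p => pvOnBoard (pvKey p)) =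
      pvCells.countP (fun c => (pvLookup assignment c).isSome) := by
    calc List.countP (fun p => pvOnBoard (pvKey p)) (pvItems assignment [])
        = List.countP (fun p => pvOnBoard (pvKey p) && true) (pvItems assignment []) := by
          apply List.countP_congr; intro p _; simp
      _ = pvCells.countP (fun c => ((pvLookup assignment c).map (fun _ => true)).getD false) :=
          count_items_eq_count_cells assignment (fun _ => true)
      _ = pvCells.countP (fun c => (pvLookup assignment c).isSome) := by
          apply List.countP_congr; intro c _
          cases hx : pvLookup assignment c <;> simp
  have hq : (pvItems assignment []).countP (fun p => pvOnBoard (pvKey p) && p.2.2 == "Q") =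
      pvCells.countP (fun c => pvLookup assignment c == some "Q") := by
    rw [count_items_eq_count_cells assignment (fun v => v == "Q")]
    apply List.countP_congr
    intro c _
    cases h : pvLookup assignment c <;> simp [h]
  rw [hcov, hq]
  have hlen : pvCells.length = 64 := by decide
  have hsum : pvCells.countP (fun c => (pvLookup assignment c).isSome) +
      pvCells.countP (fun c => (pvLookup assignment c).isNone) = 64 := by
    have hl := List.length_eq_countP_add_countP (l := pvCells)
      (p := fun c => (pvLookup assignment c).isSome)
    rw [hlen] at hl
    rw [hl]
    congr 1
    apply List.countP_congr
    intro c _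
    cases h : pvLookup assignment c <;> simp [h]
  by_cases hany : pvCells.any (fun c => (pvLookup assignment c).isNone) = true
  · have h1 : 1 ≤ pvCells.countP (fun c => (pvLookup assignment c).isNone) := by
      rcases List.any_eq_true.mp hany with ⟨c, hc, hnone⟩
      exact List.countP_pos_iff.mpr ⟨c, hc, hnone⟩
    simp only [hany, if_true]
    have h2 : (0 : Int) + (pvCells.countP (fun c => (pvLookup assignment c).isSome) : Int) < 64 := by
      omega
    simp only [h2, if_true]
  · have h0 : pvCells.countP (fun c => (pvLookup assignment c).isNone) = 0 := by
      rw [List.countP_eq_zero]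
      intro c hc
      by_contra hnone
      exact hany (List.any_eq_true.mpr ⟨c, hc, by simpa using hnone⟩)
    have hc64 : pvCells.countP (fun c => (pvLookup assignment c).isSome) = 64 := by omega
    simp [hany, hc64]
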